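-- pv_equiv track=rewrite | github.com/laszlomazsar-hash/rastaimperium | app/ark_engine/rasta_principles/jah_core.py | _extract_function_lengths
-- ===== SOURCE A (Python) =====
-- from typing import Any, Dict, List, Optional
--
-- def _extract_function_lengths(code: str) -> List[int]:
--     """Extract function/method lengths."""
--
--     lines = code.split("\n")
--     in_function = False
--     function_lengths = []
--     current_length = 0
--
--     for line in lines:
--         stripped = line.strip()
--         if stripped.startswith("def ") or stripped.startswith("class "):
--             if in_function and current_length > 0:
--                 function_lengths.append(current_length)
--             in_function = True
--             current_length = 0
--         elif in_function and stripped: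
--             current_length += 1
--
--     if in_function and current_length > 0:
--         function_lengths.append(current_length)
--
--     return function_lengths
-- ===== SOURCE B (Python) =====
-- def _extract_function_lengths(code):
--     """Extract function/method lengths."""
--     def is_header(line):
--         s = line.strip()
--         return s.startswith("def ") or s.startswith("class ")
--
--     segments = []  # one body (list of lines) per header seen so far
--     for line in code.split("\n"):
--         if is_header(line):
--             segments.append([])
--         elif segments:
--             segments[-1].append(line)
--     counts = [sum(1 for ln in seg if ln.strip()) for seg in segments]
--     return [n for n in counts if n]
-- ===== Notes on version B (the rewrite author's own statement) =====
-- stated objective: alternative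
-- what changed: Replaces A's single-pass state machine (in_function flag + running current_length with conditional flushes) by a two-phase decomposition: group the lines into one body list per def/class header, then count non-empty lines per body and keep the non-zero counts.
import Mathlib
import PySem

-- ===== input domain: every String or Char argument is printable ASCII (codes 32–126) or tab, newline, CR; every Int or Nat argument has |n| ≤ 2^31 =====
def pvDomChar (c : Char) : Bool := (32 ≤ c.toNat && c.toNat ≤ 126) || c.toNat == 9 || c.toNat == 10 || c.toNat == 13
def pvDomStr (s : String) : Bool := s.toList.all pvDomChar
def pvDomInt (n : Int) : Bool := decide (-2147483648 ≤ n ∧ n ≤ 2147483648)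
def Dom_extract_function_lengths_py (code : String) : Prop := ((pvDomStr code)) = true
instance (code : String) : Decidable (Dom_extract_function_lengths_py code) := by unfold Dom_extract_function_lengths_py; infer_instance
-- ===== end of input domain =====

-- B replaces A's in_function/current_length state machine by a two-phase decomposition
-- (group lines into one body per def/class header, then count non-empty lines per body
-- and keep the non-zero counts); same cost, objective: alternative decomposition.

-- ===== PORT A =====
-- the for-loop of A over lines, state (in_function, function_lengths, current_length)
def pvALoop : List (List Char) → Bool → List Int → Int → List Int
  | [], inF, acc, cur => if inF && decide (0 < cur) then acc ++ [cur] else acc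
  | line :: rest, inF, acc, cur =>
    let stripped := PySem.Chars.strip line
    if PySem.Chars.startswith stripped "def ".toList
        || PySem.Chars.startswith stripped "class ".toList then
      pvALoop rest true (if inF && decide (0 < cur) then acc ++ [cur] else acc) 0
    else if inF && !stripped.isEmpty then
      pvALoop rest inF acc (cur + 1)
    else
      pvALoop rest inF acc cur

def extract_function_lengths_py (code : String) : List Int :=
  pvALoop (PySem.Chars.splitOn code.toList "\n".toList) false [] 0

-- ===== PORT B =====
-- B's helper is_header(line)
def pvIsHeader (line : List Char) : Bool :=
  let s := PySem.Chars.strip line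
  PySem.Chars.startswith s "def ".toList || PySem.Chars.startswith s "class ".toList

-- B's grouping loop: `segments.append([])` on a header, else `segments[-1].append(line)`
def pvGroup : List (List Char) → List (List (List Char)) → List (List (List Char))
  | [], segs => segs
  | line :: rest, segs =>
    if pvIsHeader line then pvGroup rest (segs ++ [[]])
    else if !segs.isEmpty then pvGroup rest (segs.dropLast ++ [segs.getLastD [] ++ [line]])
    else pvGroup rest segs

-- B's `sum(1 for ln in seg if ln.strip())` (a 0/1-sum is countP)
def pvCount (seg : List (List Char)) : Int :=
  (seg.countP (fun ln => !(PySem.Chars.strip ln).isEmpty) : Int)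

def extract_function_lengths_py_alt (code : String) : List Int :=
  let segments := pvGroup (PySem.Chars.splitOn code.toList "\n".toList) []
  (segments.map pvCount).filter (fun n => n != 0)

-- ===== PRECONDITION & SPEC =====
def Spec_extract_function_lengths_py (code : String) (out : List Int) : Prop := out = extract_function_lengths_py_alt code
instance (code : String) (out : List Int) : Decidable (Spec_extract_function_lengths_py code out) := by unfold Spec_extract_function_lengths_py; infer_instance

-- ===== CLAIM (what is proved, stated in full; the proofs are below) =====
def Claim_equal_extract_function_lengths_py : Prop := ∀ (code : String), Dom_extract_function_lengths_py code → Spec_extract_function_lengths_py code (extract_function_lengths_py code)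

-- ===== LEMMAS AND PROOFS =====

theorem pv_isEmpty_concat {α : Type} (l : List α) (x : α) : (l ++ [x]).isEmpty = false := by
  simp

theorem pvCount_nonneg (seg : List (List Char)) : 0 ≤ pvCount seg :=
  Int.natCast_nonneg _

-- A's conditional flush of current_length equals filtering the counts of all of B's segments
theorem pv_flush (segs : List (List (List Char))) :
    (if (!segs.isEmpty) && decide (0 < pvCount (segs.getLastD [])) then
        ((segs.dropLast.map pvCount).filter (fun n => n != 0)) ++ [pvCount (segs.getLastD [])]
      else (segs.dropLast.map pvCount).filter (fun n => n != 0))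
    = (segs.map pvCount).filter (fun n => n != 0) := by
  rcases segs.eq_nil_or_concat with rfl | ⟨L, b, rfl⟩
  · simp
  · have hnn := pvCount_nonneg b
    by_cases h : pvCount b = 0 <;>
      simp [List.filter_append, h] ; omega

-- loop invariant tying A's (in_function, acc, current_length) to B's segments
theorem pv_key (ls : List (List Char)) : ∀ segs : List (List (List Char)),
    pvALoop ls (!segs.isEmpty)
      ((segs.dropLast.map pvCount).filter (fun n => n != 0))
      (pvCount (segs.getLastD []))
    = ((pvGroup ls segs).map pvCount).filter (fun n => n != 0) := by
  induction ls with
  | nil => intro segs; simpa [pvALoop, pvGroup] using pv_flush segs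
  | cons line rest ih =>
    intro segs
    by_cases hh : (PySem.Chars.startswith (PySem.Chars.strip line) "def ".toList
        || PySem.Chars.startswith (PySem.Chars.strip line) "class ".toList) = true
    · -- header line: A flushes and resets, B opens a new empty segment
      rw [pvALoop, pvGroup]
      simp only [pvIsHeader, hh, if_pos]
      rw [pv_flush segs]
      have := ih (segs ++ [[]])
      simpa [pv_isEmpty_concat, List.dropLast_concat, List.getLastD_concat, pvCount] using this
    · rcases segs.eq_nil_or_concat with rfl | ⟨L, b, rfl⟩
      · -- before the first header: both ignore the line
        rw [pvALoop, pvGroup]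
        simp only [pvIsHeader, hh]
        simpa using ih []
      · -- inside a segment: B appends the line to the last segment
        rw [pvALoop, pvGroup]
        simp only [pvIsHeader, hh]
        have := ih (L ++ [b ++ [line]])
        by_cases he : (PySem.Chars.strip line).isEmpty = true
        · -- blank line: count of the last segment unchanged
          simpa [pv_isEmpty_concat, List.dropLast_concat, List.getLastD_concat, pvCount,
            List.countP_append, List.countP_cons, he] using this
        · -- non-blank line: count of the last segment grows by one
          simpa [pv_isEmpty_concat, List.dropLast_concat, List.getLastD_concat, pvCount,
            List.countP_append, List.countP_cons, he] using this

-- ===== VERDICT (by name: the statement is the Claim_ definition above) =====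
theorem extract_function_lengths_py_spec : Claim_equal_extract_function_lengths_py := by
  intro code _
  show extract_function_lengths_py code = extract_function_lengths_py_alt code
  unfold extract_function_lengths_py extract_function_lengths_py_alt
  simpa [pvCount] using pv_key (PySem.Chars.splitOn code.toList "\n".toList) []
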